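-- pv_equiv track=rewrite | github.com/13927729580/caa_bot | code/chat/diy/inc_chat_engine.py | gossip_bug_ner
-- ===== SOURCE A (Python) =====
-- def gossip_bug_ner(q_p="",dic_ner_1={},dic_ner_2={}):
--
--     gossip_if = True
--
--     for x in dic_ner_1:
--         if (x.strip() in q_p):
--             gossip_if = False
--             return gossip_if
--
--     for x in dic_ner_2:
--         if (x.strip() in q_p):
--             gossip_if = False
--             return gossip_if
--
--     return gossip_if
-- ===== SOURCE B (Python) =====
-- def gossip_bug_ner(q_p="", dic_ner_1={}, dic_ner_2={}):
--     # Position-major scan: walk the text once; at each position test whether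
--     # any stripped pattern starts there (instead of one full substring search
--     # per pattern).
--     pats = [x.strip() for x in dic_ner_1] + [x.strip() for x in dic_ner_2]
--     i = 0
--     while True:
--         for p in pats:
--             if q_p.startswith(p, i):
--                 return False
--         if i >= len(q_p):
--             return True
--         i += 1
-- ===== Notes on version B (the rewrite author's own statement) =====
-- stated objective: alternative
-- what changed: B strips all keys once into one pattern list and does a single position-major scan of the text, testing startswith at each position, instead of A's pattern-major pair of loops each running a full substring search.
import Mathlib
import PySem

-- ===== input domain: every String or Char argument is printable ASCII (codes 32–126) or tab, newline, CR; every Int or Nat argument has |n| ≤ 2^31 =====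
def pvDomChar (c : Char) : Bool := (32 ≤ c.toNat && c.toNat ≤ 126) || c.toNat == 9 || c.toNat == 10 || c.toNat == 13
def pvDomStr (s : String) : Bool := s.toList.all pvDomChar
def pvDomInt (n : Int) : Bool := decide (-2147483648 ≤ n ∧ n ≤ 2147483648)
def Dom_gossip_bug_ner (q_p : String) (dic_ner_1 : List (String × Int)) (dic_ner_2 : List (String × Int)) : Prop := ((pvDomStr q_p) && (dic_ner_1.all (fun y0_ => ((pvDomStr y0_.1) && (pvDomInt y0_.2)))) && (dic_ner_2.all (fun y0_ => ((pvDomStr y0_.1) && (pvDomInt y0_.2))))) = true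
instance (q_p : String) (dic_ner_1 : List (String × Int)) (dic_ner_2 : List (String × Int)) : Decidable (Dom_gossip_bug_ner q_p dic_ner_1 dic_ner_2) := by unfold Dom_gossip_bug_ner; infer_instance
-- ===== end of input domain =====

-- B strips all keys once and replaces A's pattern-major pair of early-return loops
-- with a single position-major scan of the text (objective: alternative, same cost).

-- ===== PORT A =====
-- A: two early-return loops over the dict keys, each testing 'x.strip() in q_p'.
def gossipLoopA (q_p : String) : List (String × Int) → Option Bool
  | [] => none
  | x :: rest =>
    if PySem.Str.isIn (PySem.Str.strip x.1) q_p then some false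
    else gossipLoopA q_p rest

def gossip_bug_ner (q_p : String) (dic_ner_1 : List (String × Int)) (dic_ner_2 : List (String × Int)) : Bool :=
  match gossipLoopA q_p dic_ner_1 with
  | some b => b
  | none =>
    match gossipLoopA q_p dic_ner_2 with
    | some b => b
    | none => true

-- ===== PORT B =====
-- B: strip all keys once, then a single position-major scan of the text:
-- the while loop over i becomes structural recursion on the suffix q_p.toList.drop i.
def gossipScanB (pats : List String) : List Char → Bool
  | [] => if pats.any (fun p => PySem.Chars.startswith [] p.toList) then false else true
  | c :: rest =>
    if pats.any (fun p => PySem.Chars.startswith (c :: rest) p.toList) then false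
    else gossipScanB pats rest

def gossip_bug_ner_alt (q_p : String) (dic_ner_1 : List (String × Int)) (dic_ner_2 : List (String × Int)) : Bool :=
  gossipScanB
    (dic_ner_1.map (fun x => PySem.Str.strip x.1) ++ dic_ner_2.map (fun x => PySem.Str.strip x.1))
    q_p.toList

-- ===== PRECONDITION & SPEC =====
def Spec_gossip_bug_ner (q_p : String) (dic_ner_1 : List (String × Int)) (dic_ner_2 : List (String × Int)) (out : Bool) : Prop := out = gossip_bug_ner_alt q_p dic_ner_1 dic_ner_2
instance (q_p : String) (dic_ner_1 : List (String × Int)) (dic_ner_2 : List (String × Int)) (out : Bool) : Decidable (Spec_gossip_bug_ner q_p dic_ner_1 dic_ner_2 out) := by unfold Spec_gossip_bug_ner; infer_instance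

-- ===== CLAIM (what is proved, stated in full; the proofs are below) =====
def Claim_equal_gossip_bug_ner : Prop := ∀ (q_p : String) (dic_ner_1 : List (String × Int)) (dic_ner_2 : List (String × Int)), Dom_gossip_bug_ner q_p dic_ner_1 dic_ner_2 → Spec_gossip_bug_ner q_p dic_ner_1 dic_ner_2 (gossip_bug_ner q_p dic_ner_1 dic_ner_2)

-- ===== LEMMAS AND PROOFS =====

-- A's loop returns (some false) exactly when some stripped key is a substring.
theorem gossipLoopA_eq (q_p : String) (d : List (String × Int)) :
    gossipLoopA q_p d =
      if d.any (fun x => PySem.Str.isIn (PySem.Str.strip x.1) q_p) then some false else none := by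
  induction d with
  | nil => rfl
  | cons x rest ih =>
    simp only [gossipLoopA, ih, List.any_cons]
    by_cases h : PySem.Str.isIn (PySem.Str.strip x.1) q_p = true
    · simp only [h, Bool.true_or]
      rw [if_pos trivial, if_pos trivial]
    · rw [Bool.not_eq_true] at h
      simp only [h, Bool.false_or]
      rw [if_neg (by simp)]

-- B's scan returns true exactly when no pattern occurs as a substring.
theorem gossipScanB_eq (pats : List String) (s : List Char) :
    gossipScanB pats s = ! pats.any (fun p => PySem.Chars.isIn p.toList s) := by
  induction s with
  | nil =>
    simp only [gossipScanB]
    have he : ∀ p : List Char, PySem.Chars.isIn p ([] : List Char) = PySem.Chars.startswith [] p := by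
      intro p
      by_cases h : PySem.Chars.startswith ([] : List Char) p = true
      · rw [h, PySem.Chars.isIn_iff_infix]
        exact List.IsPrefix.isInfix ((PySem.Chars.startswith_iff _ _).mp h)
      · have : PySem.Chars.isIn p ([] : List Char) = false := by
          rw [PySem.Chars.isIn_eq_false_iff]
          intro hinf
          exact h ((PySem.Chars.startswith_iff _ _).mpr
            (by simp [List.infix_nil.mp hinf]))
        simp [this, Bool.eq_false_iff.mpr h]
    simp only [he]
    cases pats.any (fun p => PySem.Chars.startswith [] p.toList) <;> simp
  | cons c rest ih =>
    simp only [gossipScanB, ih]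
    by_cases h : (pats.any (fun p => PySem.Chars.startswith (c :: rest) p.toList)) = true
    · obtain ⟨p, hp, hs⟩ := List.any_eq_true.mp h
      have : pats.any (fun p => PySem.Chars.isIn p.toList (c :: rest)) = true := by
        refine List.any_eq_true.mpr ⟨p, hp, ?_⟩
        rw [PySem.Chars.isIn_iff_infix]
        exact List.IsPrefix.isInfix ((PySem.Chars.startswith_iff _ _).mp hs)
      simp [h, this]
    · rw [if_neg h]
      congr 1
      rw [Bool.eq_iff_iff]
      simp only [List.any_eq_true] at h ⊢
      constructor
      · rintro ⟨p, hp, hin⟩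
        refine ⟨p, hp, ?_⟩
        rw [PySem.Chars.isIn_iff_infix] at hin ⊢
        exact List.infix_cons_iff.mpr (Or.inr hin)
      · rintro ⟨p, hp, hin⟩
        refine ⟨p, hp, ?_⟩
        rw [PySem.Chars.isIn_iff_infix] at hin ⊢
        rcases List.infix_cons_iff.mp hin with hpre | hinf
        · exact absurd ⟨p, hp, (PySem.Chars.startswith_iff _ _).mpr hpre⟩ h
        · exact hinf

theorem isIn_toList (sub s : String) :
    PySem.Chars.isIn sub.toList s.toList = PySem.Str.isIn sub s := by
  simp [PySem.Str.isIn_eq]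

-- ===== VERDICT (by name: the statement is the Claim_ definition above) =====
theorem gossip_bug_ner_spec : Claim_equal_gossip_bug_ner := by
  intro q_p d1 d2 _
  unfold Spec_gossip_bug_ner gossip_bug_ner gossip_bug_ner_alt
  rw [gossipLoopA_eq, gossipLoopA_eq, gossipScanB_eq]
  simp only [List.any_append, List.any_map, Function.comp_def, isIn_toList]
  cases h1 : d1.any (fun x => PySem.Str.isIn (PySem.Str.strip x.1) q_p) <;>
    cases h2 : d2.any (fun x => PySem.Str.isIn (PySem.Str.strip x.1) q_p) <;> simp
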